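-- pv_equiv track=rewrite | github.com/srpadrono/Pathfinder | skills/pathfinder/scripts/generate-diagrams.py | _build_branch_map
-- ===== SOURCE A (Python) =====
-- from collections import defaultdict
--
-- def _build_branch_map(all_journeys: list[dict]) -> dict[str, list[tuple[str, str]]]:
--     """Build a map of step_id -> list of (next_step_id, next_action) across all journeys.
--
--     This detects where a shared step leads to different next steps in different journeys,
--     i.e. decision/branching points.
--     """
--     branch_map: dict[str, list[tuple[str, str]]] = defaultdict(list)
--     for journey in all_journeys:
--         steps = journey.get("steps", [])
--         for i in range(len(steps) - 1):
--             sid = steps[i].get("id", "")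
--             next_sid = steps[i + 1].get("id", "")
--             next_action = steps[i + 1].get("action", next_sid)
--             pair = (next_sid, next_action)
--             if pair not in branch_map[sid]:
--                 branch_map[sid].append(pair)
--     return branch_map
-- ===== SOURCE B (Python) =====
-- from collections import defaultdict
--
-- def _build_branch_map(all_journeys: list[dict]) -> dict[str, list[tuple[str, str]]]:
--     """Group-by variant: flatten all adjacent-step transitions into one list, then
--     build each key's value wholesale by filtering that list (no incremental dict
--     mutation), deduplicating in first-occurrence order."""
--     transitions = []
--     for journey in all_journeys:
--         steps = journey.get("steps", [])
--         for prev, nxt in zip(steps, steps[1:]):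
--             next_sid = nxt.get("id", "")
--             transitions.append((prev.get("id", ""), (next_sid, nxt.get("action", next_sid))))
--     result = defaultdict(list)
--     for sid in dict.fromkeys(s for s, _ in transitions):
--         result[sid] = list(dict.fromkeys(p for s, p in transitions if s == sid))
--     return result
-- ===== Notes on version B (the rewrite author's own statement) =====
-- stated objective: alternative
-- what changed: A builds the dict incrementally, mutating one entry per transition with an interleaved membership check; B never updates a dict per transition: it flattens all adjacent-step transitions into one list and then constructs each distinct step id's value wholesale by filtering that list and deduplicating in first-occurrence order (group-by instead of incremental accumulation).
import Mathlib
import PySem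

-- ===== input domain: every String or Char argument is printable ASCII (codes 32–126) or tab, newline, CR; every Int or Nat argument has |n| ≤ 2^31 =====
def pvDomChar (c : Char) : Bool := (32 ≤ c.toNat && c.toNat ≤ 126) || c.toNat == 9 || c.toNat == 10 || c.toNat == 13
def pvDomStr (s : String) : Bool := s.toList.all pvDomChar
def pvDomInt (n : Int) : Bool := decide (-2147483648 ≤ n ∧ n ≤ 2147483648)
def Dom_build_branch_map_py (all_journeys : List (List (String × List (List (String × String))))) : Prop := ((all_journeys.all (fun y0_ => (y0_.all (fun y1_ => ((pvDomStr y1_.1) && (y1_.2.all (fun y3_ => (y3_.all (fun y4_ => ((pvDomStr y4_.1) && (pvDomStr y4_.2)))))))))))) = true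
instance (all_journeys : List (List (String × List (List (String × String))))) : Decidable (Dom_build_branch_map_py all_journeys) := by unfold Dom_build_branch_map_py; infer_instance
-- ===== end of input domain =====

-- B replaces A's incremental dict mutation (one entry touched per transition) with a
-- group-by: flatten all transitions, then build each key's value wholesale by filtering;
-- equivalence of return values.

-- ===== PORT A =====

-- step.get(k, dflt) on a dict given as an association list: first match
def pvGetStr (d : List (String × String)) (k dflt : String) : String :=
  match d.find? (fun p => p.1 == k) with
  | some p => p.2
  | none => dflt

-- journey.get("steps", [])
def pvGetSteps (j : List (String × List (List (String × String)))) :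
    List (List (String × String)) :=
  match j.find? (fun p => p.1 == "steps") with
  | some p => p.2
  | none => []

-- branch_map[sid] (defaultdict vivification) + 'if pair not in …: append' in one walk:
-- exact model of A's mutation of the insertion-ordered dict
def aStep (m : List (String × List (String × String))) (s : String)
    (p : String × String) : List (String × List (String × String)) :=
  match m with
  | [] => [(s, [p])]
  | (k, v) :: rest =>
    if k == s then (if p ∈ v then (k, v) :: rest else (k, v ++ [p]) :: rest)
    else (k, v) :: aStep rest s p

-- 'for i in range(len(steps)-1)' over adjacent pairs steps[i], steps[i+1]
def aSteps (m : List (String × List (String × String))) :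
    List (List (String × String)) → List (String × List (String × String))
  | s1 :: s2 :: rest =>
    let sid := pvGetStr s1 "id" ""
    let next_sid := pvGetStr s2 "id" ""
    let next_action := pvGetStr s2 "action" next_sid
    aSteps (aStep m sid (next_sid, next_action)) (s2 :: rest)
  | _ => m

def build_branch_map_py (all_journeys : List (List (String × List (List (String × String))))) : List (String × List (String × String)) :=
  all_journeys.foldl (fun m j => aSteps m (pvGetSteps j)) []

-- ===== PORT B =====

-- zip(steps, steps[1:]) yielding (sid, (next_sid, next_action))
def bAdj : List (List (String × String)) → List (String × (String × String))
  | s1 :: s2 :: rest =>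
    let next_sid := pvGetStr s2 "id" ""
    (pvGetStr s1 "id" "", (next_sid, pvGetStr s2 "action" next_sid)) :: bAdj (s2 :: rest)
  | _ => []

-- group-by: 'for sid in dict.fromkeys(…): result[sid] = list(dict.fromkeys(filter))'
def build_branch_map_py_alt (all_journeys : List (List (String × List (List (String × String))))) : List (String × List (String × String)) :=
  let transitions := all_journeys.flatMap (fun j => bAdj (pvGetSteps j))
  (PySem.Set.ofList (transitions.map Prod.fst)).map
    (fun sid =>
      (sid, PySem.Set.ofList ((transitions.filter (fun t => t.1 == sid)).map Prod.snd)))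

-- ===== PRECONDITION & SPEC =====
def Spec_build_branch_map_py (all_journeys : List (List (String × List (List (String × String))))) (out : List (String × List (String × String))) : Prop := out = build_branch_map_py_alt all_journeys
instance (all_journeys : List (List (String × List (List (String × String))))) (out : List (String × List (String × String))) : Decidable (Spec_build_branch_map_py all_journeys out) := by unfold Spec_build_branch_map_py; infer_instance

-- ===== CLAIM (what is proved, stated in full; the proofs are below) =====
def Claim_equal_build_branch_map_py : Prop := ∀ (all_journeys : List (List (String × List (List (String × String))))), Dom_build_branch_map_py all_journeys → Spec_build_branch_map_py all_journeys (build_branch_map_py all_journeys)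

-- ===== LEMMAS AND PROOFS =====

-- proof-side helper: duplicate-keeping defaultdict append
def gStep (m : List (String × List (String × String))) (s : String)
    (p : String × String) : List (String × List (String × String)) :=
  match m with
  | [] => [(s, [p])]
  | (k, v) :: rest => if k == s then (k, v ++ [p]) :: rest else (k, v) :: gStep rest s p

-- proof-side helper: dedup each value
def mapDedup (m : List (String × List (String × String))) :
    List (String × List (String × String)) :=
  m.map (fun kv => (kv.1, PySem.Set.ofList kv.2))

-- proof-side helper: group the transition list by a given key list
def Gk (ks : List String) (ts : List (String × (String × String))) :
    List (String × List (String × String)) :=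
  ks.map (fun k => (k, (ts.filter (fun t => t.1 == k)).map Prod.snd))

-- A's per-journey loop is the fold of aStep over the adjacent-pair list
theorem aSteps_eq_foldl (ss : List (List (String × String)))
    (m : List (String × List (String × String))) :
    aSteps m ss = (bAdj ss).foldl (fun m t => aStep m t.1 t.2) m := by
  induction ss generalizing m with
  | nil => simp [aSteps, bAdj]
  | cons s1 rest ih =>
    cases rest with
    | nil => simp [aSteps, bAdj]
    | cons s2 rest' => simp [aSteps, bAdj, ih]

-- A's double loop is the fold over the flattened transition list
theorem buildA_eq_foldl (js : List (List (String × List (List (String × String)))))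
    (m : List (String × List (String × String))) :
    js.foldl (fun m j => aSteps m (pvGetSteps j)) m
      = (js.flatMap (fun j => bAdj (pvGetSteps j))).foldl (fun m t => aStep m t.1 t.2) m := by
  induction js generalizing m with
  | nil => rfl
  | cons j js ih =>
    simp only [List.flatMap_cons, List.foldl_append, List.foldl_cons]
    rw [aSteps_eq_foldl, ih]

-- one interleaved A-step on the deduped dict = dedup of one duplicate-keeping step
theorem aStep_mapDedup (g : List (String × List (String × String))) (s : String)
    (p : String × String) :
    aStep (mapDedup g) s p = mapDedup (gStep g s p) := by
  induction g with
  | nil => simp [mapDedup, aStep, gStep, PySem.Set.ofList]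
  | cons kv rest ih =>
    obtain ⟨k, v⟩ := kv
    by_cases hk : k == s
    · by_cases hp : p ∈ v
      · simp [mapDedup, aStep, gStep, hk, PySem.Set.mem_ofList, hp,
          PySem.Set.ofList_append_singleton, PySem.Set.add_of_mem]
      · simp [mapDedup, aStep, gStep, hk, PySem.Set.mem_ofList, hp,
          PySem.Set.ofList_append_singleton, PySem.Set.add_of_not_mem]
    · simpa [mapDedup, aStep, gStep, hk] using ih

theorem foldl_aStep_mapDedup (ts : List (String × (String × String)))
    (g : List (String × List (String × String))) :
    ts.foldl (fun m t => aStep m t.1 t.2) (mapDedup g)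
      = mapDedup (ts.foldl (fun m t => gStep m t.1 t.2) g) := by
  induction ts generalizing g with
  | nil => rfl
  | cons t ts ih => simp [List.foldl_cons, aStep_mapDedup, ih]

-- gStep on the grouping of ts, key already present (ks nodup) = grouping of ts ++ [(s,p)]
theorem gStep_Gk_mem (ks : List String) (ts : List (String × (String × String)))
    (s : String) (p : String × String) (hnd : ks.Nodup) (hs : s ∈ ks) :
    gStep (Gk ks ts) s p = Gk ks (ts ++ [(s, p)]) := by
  induction ks with
  | nil => cases hs
  | cons k ks ih =>
    by_cases hk : k = s
    · subst hk
      have hrest : k ∉ ks := (List.nodup_cons.mp hnd).1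
      simp [Gk, gStep, List.filter_append]
      exact fun a ha h => hrest (h ▸ ha)
    · have hs' : s ∈ ks := by cases hs with
        | head => exact absurd rfl hk
        | tail _ h => exact h
      have hkb : ¬ (k == s) = true := by simp [beq_iff_eq, hk]
      have hsk : (s == k) = false := by
        simp only [beq_eq_false_iff_ne]; exact fun h => hk h.symm
      have ih' := ih (List.nodup_cons.mp hnd).2 hs'
      simp only [Gk] at ih'
      simp [Gk, gStep, hkb, hsk, List.filter_append, ih']

-- gStep on the grouping, key absent from ks and from ts = grouping with the key appended
theorem gStep_Gk_not_mem (ks : List String) (ts : List (String × (String × String)))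
    (s : String) (p : String × String) (hs : s ∉ ks) (hts : s ∉ ts.map Prod.fst) :
    gStep (Gk ks ts) s p = Gk (ks ++ [s]) (ts ++ [(s, p)]) := by
  induction ks with
  | nil =>
    have hfil : ts.filter (fun t => t.1 == s) = [] := by
      rw [List.filter_eq_nil_iff]
      intro t ht
      simp only [beq_iff_eq]
      intro h; exact hts (h ▸ List.mem_map_of_mem ht)
    simp [Gk, gStep, List.filter_append, hfil]
  | cons k ks ih =>
    have hkb : ¬ (k == s) = true := by
      simp only [beq_iff_eq]; intro h; exact hs (h ▸ List.mem_cons_self)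
    have hsk : (s == k) = false := by
      simp only [beq_eq_false_iff_ne]; intro h; exact hs (h ▸ List.mem_cons_self)
    simp only [Gk, List.map_cons, gStep, hkb, List.cons_append] at *
    rw [ih (fun h => hs (List.mem_cons_of_mem _ h))]
    simp [List.filter_append, hsk]

-- the duplicate-keeping fold is the group-by over first-occurrence keys
theorem gfold_eq_Gk (ts : List (String × (String × String))) :
    ts.foldl (fun m t => gStep m t.1 t.2) []
      = Gk (PySem.Set.ofList (ts.map Prod.fst)) ts := by
  induction ts using List.reverseRecOn with
  | nil => rfl
  | append_singleton ts t ih =>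
    obtain ⟨s, p⟩ := t
    rw [List.foldl_append, List.foldl_cons, List.foldl_nil, ih]
    by_cases hs : s ∈ ts.map Prod.fst
    · have hm : s ∈ PySem.Set.ofList (ts.map Prod.fst) := by
        rw [PySem.Set.mem_ofList]; exact hs
      rw [gStep_Gk_mem _ _ _ _ (PySem.Set.nodup_ofList _) hm]
      congr 1
      simp [PySem.Set.ofList_append_singleton, PySem.Set.add_of_mem, hm]
    · have hm : s ∉ PySem.Set.ofList (ts.map Prod.fst) := by
        rw [PySem.Set.mem_ofList]; exact hs
      rw [gStep_Gk_not_mem _ _ _ _ hm hs]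
      congr 1
      simp [PySem.Set.ofList_append_singleton, hm, PySem.Set.add]

-- ===== VERDICT (by name: the statement is the Claim_ definition above) =====
theorem build_branch_map_py_spec : Claim_equal_build_branch_map_py := by
  intro js _
  show build_branch_map_py js = build_branch_map_py_alt js
  unfold build_branch_map_py build_branch_map_py_alt
  rw [buildA_eq_foldl]
  have h := foldl_aStep_mapDedup (js.flatMap (fun j => bAdj (pvGetSteps j))) []
  simp only [mapDedup, List.map_nil] at h
  rw [h, gfold_eq_Gk]
  simp [Gk, List.map_map, Function.comp]
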